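-- pv_equiv track=rewrite | github.com/theUzumaki/PokemonBattleGen1OU_predictor | src/reader.py | process_moves
-- ===== SOURCE A (Python) =====
-- def process_moves(rec: dict) -> dict:
--     moves = dict()
--     for turn in rec.get("battle_timeline", []):
--         move1 = turn.get("p1_move_details", {})
--         if move1:
--             move1 = move1.get("name", "").lower().replace("-", " ")
--             move1_user = turn.get("p1_pokemon_state", {}).get("name", "").lower().replace("-", " ")
--         move2 = turn.get("p2_move_details", {})
--         if move2:
--             move2 = move2.get("name", "").lower().replace("-", " ")
--             move2_user = turn.get("p2_pokemon_state", {}).get("name", "").lower().replace("-", " ")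
--
--         if move1:
--             if move1_user not in moves:
--                 moves[move1_user] = {move1: 1}
--             elif move1 not in moves.get(move1_user, {}):
--                 moves[move1_user][move1] = 1
--             else:
--                 moves[move1_user][move1] += 1
--         if move2:
--             if move2_user not in moves:
--                 moves[move2_user] = {move2: 1}
--             elif move2 not in moves.get(move2_user, {}):
--                 moves[move2_user][move2] = 1
--             else:
--                 moves[move2_user][move2] += 1
--     return moves
-- ===== SOURCE B (Python) =====
-- def process_moves(rec: dict) -> dict:
--     def norm(s):
--         return s.lower().replace("-", " ")
--
--     # Pass 1: flatten the timeline into the list of (user, move) occurrences,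
--     # with the same guards: skip an empty move-details dict and an empty normalized name.
--     occ = []
--     for turn in rec.get("battle_timeline", []):
--         for details_key, state_key in (
--             ("p1_move_details", "p1_pokemon_state"),
--             ("p2_move_details", "p2_pokemon_state"),
--         ):
--             details = turn.get(details_key, {})
--             if not details:
--                 continue
--             move = norm(details.get("name", ""))
--             if not move:
--                 continue
--             occ.append((norm(turn.get(state_key, {}).get("name", "")), move))
--
--     # Pass 2: declarative group-by. Users and each user's moves in first-occurrence
--     # order (dict.fromkeys), every count obtained by scanning the flat list; no
--     # mutable counters or incremental dict updates anywhere.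
--     return {
--         u: {m: occ.count((u, m))
--             for m in dict.fromkeys(m for v, m in occ if v == u)}
--         for u in dict.fromkeys(u for u, _ in occ)
--     }
-- ===== Notes on version B (the rewrite author's own statement) =====
-- stated objective: alternative
-- what changed: Replaces A's single-pass mutable nested-dict accumulation (three-way insert/increment per event) with a declarative group-by: flatten the timeline to (user, move) occurrences, dedup users and per-user moves by first occurrence with dict.fromkeys, and obtain every count by scanning the flat list with list.count - no counter or in-place increment exists in B.
import Mathlib
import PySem

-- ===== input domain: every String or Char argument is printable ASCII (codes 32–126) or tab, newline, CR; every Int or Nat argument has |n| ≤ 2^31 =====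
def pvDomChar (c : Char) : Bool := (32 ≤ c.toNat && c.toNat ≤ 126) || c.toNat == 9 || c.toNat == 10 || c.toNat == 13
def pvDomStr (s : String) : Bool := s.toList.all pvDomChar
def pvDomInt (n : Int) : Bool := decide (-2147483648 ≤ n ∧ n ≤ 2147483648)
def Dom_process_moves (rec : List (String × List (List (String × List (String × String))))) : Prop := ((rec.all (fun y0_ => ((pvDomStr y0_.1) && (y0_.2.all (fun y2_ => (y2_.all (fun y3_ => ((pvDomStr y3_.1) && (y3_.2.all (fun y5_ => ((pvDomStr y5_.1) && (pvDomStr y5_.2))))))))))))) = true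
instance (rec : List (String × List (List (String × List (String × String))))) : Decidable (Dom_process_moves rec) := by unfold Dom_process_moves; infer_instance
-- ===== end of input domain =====

-- B replaces A's single-pass mutable nested-dict accumulation with a declarative
-- group-by: flatten to (user, move) occurrences, dedup users/moves by first
-- occurrence, count each pair by scanning the flat list (objective: alternative).

-- ===== PORT A =====
-- shared helpers for Python expressions both sources use verbatim:
-- s.lower().replace("-", " "), turn.get(k, {}), d.get("name", "")
def pvNorm (s : String) : String := PySem.Str.replace (PySem.Str.lower s) "-" " "

def pvGetDict (turn : List (String × List (String × String))) (k : String) : List (String × String) :=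
  (PySem.Dict.mk turn).getD k []

def pvGetName (d : List (String × String)) : String :=
  (PySem.Dict.mk d).getD "name" ""

-- A's three-branch in-place update for one (user, move) occurrence
def pvStepA (moves : PySem.Dict String (PySem.Dict String Int)) (user mv : String) :
    PySem.Dict String (PySem.Dict String Int) :=
  if moves.contains user = false then
    moves.insert user (PySem.Dict.empty.insert mv 1)
  else if (moves.getD user PySem.Dict.empty).contains mv = false then
    moves.insert user ((moves.getD user PySem.Dict.empty).insert mv 1)
  else
    moves.insert user ((moves.getD user PySem.Dict.empty).insert mv
      ((moves.getD user PySem.Dict.empty).getD mv 0 + 1))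

-- one iteration of A's loop over the timeline; move1/move2 encode Python's
-- '{} or normalized name' with "" for the falsy dict (the value is only read when truthy);
-- moveI_user is bound unconditionally here — pure, and A only reads it when moveI is truthy
def pvTurnA (moves : PySem.Dict String (PySem.Dict String Int))
    (turn : List (String × List (String × String))) : PySem.Dict String (PySem.Dict String Int) :=
  let move1d := pvGetDict turn "p1_move_details"
  let move1 := if move1d = [] then "" else pvNorm (pvGetName move1d)
  let move1_user := pvNorm (pvGetName (pvGetDict turn "p1_pokemon_state"))
  let move2d := pvGetDict turn "p2_move_details"
  let move2 := if move2d = [] then "" else pvNorm (pvGetName move2d)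
  let move2_user := pvNorm (pvGetName (pvGetDict turn "p2_pokemon_state"))
  let moves := if move1 ≠ "" then pvStepA moves move1_user move1 else moves
  if move2 ≠ "" then pvStepA moves move2_user move2 else moves

def process_moves (rec : List (String × List (List (String × List (String × String))))) :
    List (String × List (String × Int)) :=
  let timeline := (PySem.Dict.mk rec).getD "battle_timeline" []
  let moves := timeline.foldl pvTurnA PySem.Dict.empty
  moves.items.map (fun p => (p.1, p.2.items))

-- ===== PORT B =====
def pvKeyPairs : List (String × String) :=
  [("p1_move_details", "p1_pokemon_state"), ("p2_move_details", "p2_pokemon_state")]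

-- body of B's inner gather loop: maybe append one (user, move) occurrence for one side
def pvSideOcc (occ : List (String × String)) (turn : List (String × List (String × String)))
    (ks : String × String) : List (String × String) :=
  let details := pvGetDict turn ks.1
  if details = [] then occ
  else
    let mv := pvNorm (pvGetName details)
    if mv = "" then occ
    else occ ++ [(pvNorm (pvGetName (pvGetDict turn ks.2)), mv)]

-- pass 1: flatten the timeline into occurrences
def pvOccs (rec : List (String × List (List (String × List (String × String))))) :
    List (String × String) :=
  let timeline := (PySem.Dict.mk rec).getD "battle_timeline" []
  timeline.foldl (fun occ turn => pvKeyPairs.foldl (fun o ks => pvSideOcc o turn ks) occ) []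

-- inner dict comprehension: {m: occ.count((u, m)) for m in dict.fromkeys(...)};
-- the keys are distinct, so the dict's items ARE this map in insertion order
def pvInnerItems (occ : List (String × String)) (u : String) : List (String × Int) :=
  (PySem.List.dedup (occ.filterMap (fun p => if p.1 = u then some p.2 else none))).map
    (fun m => (m, (occ.count (u, m) : Int)))

-- pass 2: the outer dict comprehension over dict.fromkeys of the users
def process_moves_alt (rec : List (String × List (List (String × List (String × String))))) :
    List (String × List (String × Int)) :=
  let occ := pvOccs rec
  (PySem.List.dedup (occ.map Prod.fst)).map (fun u => (u, pvInnerItems occ u))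

-- ===== PRECONDITION & SPEC =====
def Spec_process_moves (rec : List (String × List (List (String × List (String × String))))) (out : List (String × List (String × Int))) : Prop := out = process_moves_alt rec
instance (rec : List (String × List (List (String × List (String × String))))) (out : List (String × List (String × Int))) : Decidable (Spec_process_moves rec out) := by unfold Spec_process_moves; infer_instance

-- ===== CLAIM (what is proved, stated in full; the proofs are below) =====
def Claim_equal_process_moves : Prop := ∀ (rec : List (String × List (List (String × List (String × String))))), Dom_process_moves rec → Spec_process_moves rec (process_moves rec)

-- ===== LEMMAS AND PROOFS =====

-- A's step as a curried step over occurrence pairs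
def pvStep1 (moves : PySem.Dict String (PySem.Dict String Int)) (p : String × String) :
    PySem.Dict String (PySem.Dict String Int) := pvStepA moves p.1 p.2

theorem pvSideOcc_append (o : List (String × String)) (turn) (ks) :
    pvSideOcc o turn ks = o ++ pvSideOcc [] turn ks := by
  unfold pvSideOcc
  dsimp only
  split_ifs <;> simp

theorem pvTurnA_eq_foldl (moves) (turn : List (String × List (String × String))) :
    pvTurnA moves turn =
      (pvKeyPairs.foldl (fun o ks => pvSideOcc o turn ks) []).foldl pvStep1 moves := by
  unfold pvTurnA pvSideOcc pvKeyPairs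
  dsimp only [List.foldl]
  split_ifs <;> simp_all [pvStep1, List.foldl]

theorem pvInnerFold_append (turn : List (String × List (String × String)))
    (o : List (String × String)) :
    pvKeyPairs.foldl (fun a ks => pvSideOcc a turn ks) o
      = o ++ pvKeyPairs.foldl (fun a ks => pvSideOcc a turn ks) [] := by
  simp only [pvKeyPairs, List.foldl_cons, List.foldl_nil]
  rw [pvSideOcc_append o, pvSideOcc_append (o ++ _), pvSideOcc_append (pvSideOcc [] turn _)]
  simp

theorem pvOccFold_append (tl : List (List (String × List (String × String))))
    (o : List (String × String)) :
    tl.foldl (fun occ turn => pvKeyPairs.foldl (fun a ks => pvSideOcc a turn ks) occ) o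
      = o ++ tl.foldl (fun occ turn => pvKeyPairs.foldl (fun a ks => pvSideOcc a turn ks) occ) [] := by
  induction tl generalizing o with
  | nil => simp
  | cons t tl ih =>
    rw [List.foldl_cons, List.foldl_cons, ih, pvInnerFold_append t o,
      ih (pvKeyPairs.foldl (fun a ks => pvSideOcc a t ks) [])]
    simp

theorem pvFoldTurnA_eq (tl : List (List (String × List (String × String)))) (moves) :
    tl.foldl pvTurnA moves =
      (tl.foldl (fun occ turn => pvKeyPairs.foldl (fun o ks => pvSideOcc o turn ks) occ) []).foldl
        pvStep1 moves := by
  induction tl generalizing moves with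
  | nil => rfl
  | cons t tl ih =>
    rw [List.foldl_cons, List.foldl_cons, ih (pvTurnA moves t), pvTurnA_eq_foldl]
    conv_rhs => rw [pvOccFold_append tl (pvKeyPairs.foldl (fun o ks => pvSideOcc o t ks) [])]
    rw [List.foldl_append]

-- the intended items of the outer dict built by A after processing 'occ'
def pvOuter (occ : List (String × String)) : List (String × PySem.Dict String Int) :=
  (PySem.List.dedup (occ.map Prod.fst)).map (fun u => (u, PySem.Dict.mk (pvInnerItems occ u)))

theorem pvDedupApp {α : Type} [BEq α] [LawfulBEq α] (xs : List α) (x : α) :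
    PySem.List.dedup (xs ++ [x])
      = if x ∈ xs then PySem.List.dedup xs else PySem.List.dedup xs ++ [x] := by
  simp only [PySem.List.dedup_eq_ofList, PySem.Set.ofList_append]
  show PySem.Set.add _ _ = _
  by_cases h : x ∈ xs
  · simp [PySem.Set.add, PySem.Set.contains, (PySem.Set.mem_ofList xs x).mpr h, h]
  · have : x ∉ PySem.Set.ofList xs := fun hh => h ((PySem.Set.mem_ofList xs x).mp hh)
    simp [PySem.Set.add, PySem.Set.contains, this, h]

theorem pvMemFilter (occ : List (String × String)) (u m : String) :
    m ∈ occ.filterMap (fun p => if p.1 = u then some p.2 else none) ↔ (u, m) ∈ occ := by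
  simp only [List.mem_filterMap]
  constructor
  · rintro ⟨⟨a, b⟩, hp, h⟩
    simp only at h
    split_ifs at h with ha
    · injection h with h; subst ha; subst h; exact hp
  · intro h
    exact ⟨(u, m), h, by simp⟩

theorem pvInner_app_ne (occ : List (String × String)) (u m u' : String) (h : u' ≠ u) :
    pvInnerItems (occ ++ [(u, m)]) u' = pvInnerItems occ u' := by
  unfold pvInnerItems
  rw [List.filterMap_append]
  have h1 : List.filterMap (fun p => if p.1 = u' then some p.2 else none)
      [((u : String), (m : String))] = [] := by simp [Ne.symm h]
  rw [h1, List.append_nil]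
  apply List.map_congr_left
  intro m' hm'
  have hp : ((u', m') : String × String) ≠ (u, m) := by
    intro e; exact h (congrArg Prod.fst e)
  simp [List.count_append, Ne.symm h]

theorem pvInner_app_fresh (occ : List (String × String)) (u m : String)
    (h : ∀ p ∈ occ, p.1 ≠ u) :
    pvInnerItems (occ ++ [(u, m)]) u = [(m, 1)] := by
  unfold pvInnerItems
  have h0 : occ.filterMap (fun p => if p.1 = u then some p.2 else none) = [] := by
    rw [List.filterMap_eq_nil_iff]
    intro p hp; simp [h p hp]
  have hc : List.count ((u, m) : String × String) occ = 0 :=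
    List.count_eq_zero.mpr (fun hmem => h _ hmem rfl)
  rw [List.filterMap_append, h0]
  have h1 : List.filterMap (fun p => if p.1 = u then some p.2 else none)
      [((u : String), (m : String))] = [m] := by simp
  rw [h1]
  have hd : PySem.List.dedup (([] : List String) ++ [m]) = [m] := rfl
  rw [hd]
  simp [List.count_append, hc]

theorem pvInner_app_new (occ : List (String × String)) (u m : String)
    (hm : ((u, m) : String × String) ∉ occ) :
    pvInnerItems (occ ++ [(u, m)]) u = pvInnerItems occ u ++ [(m, 1)] := by
  unfold pvInnerItems
  have hmf : m ∉ occ.filterMap (fun p => if p.1 = u then some p.2 else none) :=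
    fun hh => hm ((pvMemFilter occ u m).mp hh)
  rw [List.filterMap_append]
  have h1 : List.filterMap (fun p => if p.1 = u then some p.2 else none)
      [((u : String), (m : String))] = [m] := by simp
  rw [h1, pvDedupApp, if_neg hmf, List.map_append]
  have hc : List.count ((u, m) : String × String) occ = 0 := List.count_eq_zero.mpr hm
  congr 1
  · apply List.map_congr_left
    intro m' hm'
    have hne : m' ≠ m := fun e => hmf (e ▸ (PySem.List.mem_dedup _ m').mp hm')
    have hp : ((u, m') : String × String) ≠ (u, m) := fun e => hne (congrArg Prod.snd e)
    simp [List.count_append, Ne.symm hne]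
  · simp [List.count_append, hc]

theorem pvInner_app_mem (occ : List (String × String)) (u m : String)
    (hm : ((u, m) : String × String) ∈ occ) :
    pvInnerItems (occ ++ [(u, m)]) u
      = (pvInnerItems occ u).map
          (fun p => if p.1 == m then (m, (occ.count ((u, m) : String × String) : Int) + 1) else p) := by
  unfold pvInnerItems
  have hmf : m ∈ occ.filterMap (fun p => if p.1 = u then some p.2 else none) :=
    (pvMemFilter occ u m).mpr hm
  rw [List.filterMap_append]
  have h1 : List.filterMap (fun p => if p.1 = u then some p.2 else none)
      [((u : String), (m : String))] = [m] := by simp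
  rw [h1, pvDedupApp, if_pos hmf, List.map_map]
  apply List.map_congr_left
  intro m' _
  by_cases he : m' = m
  · subst he
    simp [List.count_append]
  · have hp : ((u, m') : String × String) ≠ (u, m) := fun e => he (congrArg Prod.snd e)
    have hne : ¬ m = m' := fun e => he e.symm
    simp [List.count_append, he, hne]

theorem pvOuter_keys (occ : List (String × String)) :
    (PySem.Dict.mk (pvOuter occ)).keys = PySem.List.dedup (occ.map Prod.fst) := by
  simp [pvOuter, PySem.Dict.keys_mk, List.map_map, Function.comp_def]

theorem pvOuter_contains (occ : List (String × String)) (u : String) :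
    (PySem.Dict.mk (pvOuter occ)).contains u = decide (u ∈ occ.map Prod.fst) := by
  rw [PySem.Dict.contains_eq_decide_mem_keys, pvOuter_keys]
  simp

theorem pvOuter_getD (occ : List (String × String)) (u : String)
    (hu : u ∈ occ.map Prod.fst) :
    (PySem.Dict.mk (pvOuter occ)).getD u PySem.Dict.empty
      = PySem.Dict.mk (pvInnerItems occ u) := by
  apply PySem.Dict.getD_of_mem_items
  · show (u, PySem.Dict.mk (pvInnerItems occ u)) ∈ pvOuter occ
    exact List.mem_map_of_mem ((PySem.List.mem_dedup _ u).mpr hu)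
  · rw [pvOuter_keys]; exact PySem.List.nodup_dedup _

theorem pvInner_keys (occ : List (String × String)) (u : String) :
    (PySem.Dict.mk (pvInnerItems occ u)).keys
      = PySem.List.dedup (occ.filterMap (fun p => if p.1 = u then some p.2 else none)) := by
  simp [pvInnerItems, PySem.Dict.keys_mk, List.map_map, Function.comp_def]

theorem pvInner_contains (occ : List (String × String)) (u m : String) :
    (PySem.Dict.mk (pvInnerItems occ u)).contains m
      = decide (((u, m) : String × String) ∈ occ) := by
  rw [PySem.Dict.contains_eq_decide_mem_keys, pvInner_keys]
  simp

theorem pvInner_getD (occ : List (String × String)) (u m : String)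
    (hm : ((u, m) : String × String) ∈ occ) :
    (PySem.Dict.mk (pvInnerItems occ u)).getD m 0
      = (occ.count ((u, m) : String × String) : Int) := by
  apply PySem.Dict.getD_of_mem_items
  · show (m, (occ.count ((u, m) : String × String) : Int)) ∈ pvInnerItems occ u
    exact List.mem_map_of_mem
      ((PySem.List.mem_dedup _ m).mpr ((pvMemFilter occ u m).mpr hm))
  · rw [pvInner_keys]; exact PySem.List.nodup_dedup _

theorem pvOuter_replace (occ : List (String × String)) (u m : String)
    (hu : u ∈ occ.map Prod.fst) :
    pvOuter (occ ++ [(u, m)])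
      = (pvOuter occ).map
          (fun p => if p.1 == u then (u, PySem.Dict.mk (pvInnerItems (occ ++ [(u, m)]) u)) else p) := by
  unfold pvOuter
  rw [List.map_append, List.map_singleton, pvDedupApp, if_pos hu, List.map_map]
  apply List.map_congr_left
  intro u' _
  by_cases he : u' = u
  · subst he; simp
  · simp [he, pvInner_app_ne occ u m u' he]

-- characterization of A's accumulation loop over the flat occurrence list
theorem pvFoldChar (occ : List (String × String)) :
    occ.foldl pvStep1 PySem.Dict.empty = PySem.Dict.mk (pvOuter occ) := by
  induction occ using List.reverseRecOn with
  | nil => rfl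
  | append_singleton occ p ih =>
    obtain ⟨u, m⟩ := p
    rw [List.foldl_append, List.foldl_cons, List.foldl_nil, ih]
    show pvStepA (PySem.Dict.mk (pvOuter occ)) u m = _
    by_cases hu : u ∈ occ.map Prod.fst
    · have hc : (PySem.Dict.mk (pvOuter occ)).contains u = true := by
        rw [pvOuter_contains]; simpa using hu
      rw [pvStepA, if_neg (by simp [hc]), pvOuter_getD occ u hu]
      by_cases hm : ((u, m) : String × String) ∈ occ
      · have hcm : (PySem.Dict.mk (pvInnerItems occ u)).contains m = true := by
          rw [pvInner_contains]; simpa using hm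
        rw [if_neg (by simp [hcm]), pvInner_getD occ u m hm]
        apply PySem.Dict.ext
        rw [PySem.Dict.items_insert_of_contains _ _ hc]
        show _ = pvOuter (occ ++ [(u, m)])
        rw [pvOuter_replace occ u m hu]
        apply List.map_congr_left
        intro p _
        by_cases he : p.1 = u
        · simp only [he, beq_self_eq_true, if_pos]
          congr 1
          apply PySem.Dict.ext
          rw [PySem.Dict.items_insert_of_contains _ _ hcm]
          show _ = pvInnerItems (occ ++ [(u, m)]) u
          rw [pvInner_app_mem occ u m hm]
        · simp [he]
      · have hcm : (PySem.Dict.mk (pvInnerItems occ u)).contains m = false := by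
          rw [pvInner_contains]; simpa using hm
        rw [if_pos hcm]
        apply PySem.Dict.ext
        rw [PySem.Dict.items_insert_of_contains _ _ hc]
        show _ = pvOuter (occ ++ [(u, m)])
        rw [pvOuter_replace occ u m hu]
        apply List.map_congr_left
        intro p _
        by_cases he : p.1 = u
        · simp only [he, beq_self_eq_true, if_pos]
          congr 1
          apply PySem.Dict.ext
          rw [PySem.Dict.items_insert_of_not_contains _ _ hcm]
          show pvInnerItems occ u ++ [(m, 1)] = pvInnerItems (occ ++ [(u, m)]) u
          rw [pvInner_app_new occ u m hm]
        · simp [he]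
    · have hc : (PySem.Dict.mk (pvOuter occ)).contains u = false := by
        rw [pvOuter_contains]; simpa using hu
      rw [pvStepA, if_pos hc]
      apply PySem.Dict.ext
      rw [PySem.Dict.items_insert_of_not_contains _ _ hc]
      show pvOuter occ ++ [(u, PySem.Dict.empty.insert m 1)] = pvOuter (occ ++ [(u, m)])
      unfold pvOuter
      rw [List.map_append, List.map_singleton, pvDedupApp, if_neg hu, List.map_append]
      congr 1
      · apply List.map_congr_left
        intro u' hu'
        have hne : u' ≠ u := fun e => hu (e ▸ (PySem.List.mem_dedup _ u').mp hu')
        rw [pvInner_app_ne occ u m u' hne]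
      · have hfr : ∀ p ∈ occ, p.1 ≠ u := by
          intro p hp e; exact hu (e ▸ List.mem_map_of_mem hp)
        rw [List.map_singleton, pvInner_app_fresh occ u m hfr]
        rfl

-- ===== VERDICT (by name: the statement is the Claim_ definition above) =====
theorem process_moves_spec : Claim_equal_process_moves := by
  intro rec _
  unfold Spec_process_moves process_moves process_moves_alt pvOccs
  dsimp only
  rw [pvFoldTurnA_eq, pvFoldChar]
  show (pvOuter _).map _ = _
  unfold pvOuter
  rw [List.map_map]
  rfl
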